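-- pv_equiv track=rewrite | github.com/JochenWeerda/VALEO-NeuroERP-3.0 | app/access_control/management.py | _generate_access_control_recommendations
-- ===== SOURCE A (Python) =====
-- from typing import Dict, Any, List, Optional, Tuple
--
-- def _generate_access_control_recommendations(issues: List[str]) -> List[str]:
--     """Generate access control recommendations"""
--     recommendations = []
--
--     if any('user account' in issue.lower() for issue in issues):
--         recommendations.append("Implement comprehensive user account lifecycle management")
--         recommendations.append("Establish regular password policy enforcement")
--
--     if any('authentication' in issue.lower() for issue in issues):
--         recommendations.append("Deploy multi-factor authentication for all users")
--         recommendations.append("Strengthen password policies and monitoring")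
--
--     if any('access rights' in issue.lower() for issue in issues):
--         recommendations.append("Establish regular access rights review process")
--         recommendations.append("Implement automated access certification workflows")
--
--     if not recommendations:
--         recommendations.append("Maintain current access control standards and monitoring")
--
--     return recommendations
-- ===== SOURCE B (Python) =====
-- def _generate_access_control_recommendations(issues):
--     """Generate access control recommendations"""
--     has_user_account = has_authentication = has_access_rights = False
--     for issue in issues:
--         low = issue.lower()
--         if 'user account' in low:
--             has_user_account = True
--         if 'authentication' in low:
--             has_authentication = True
--         if 'access rights' in low:
--             has_access_rights = True
--     recs = []
--     if has_user_account:
--         recs += ["Implement comprehensive user account lifecycle management",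
--                  "Establish regular password policy enforcement"]
--     if has_authentication:
--         recs += ["Deploy multi-factor authentication for all users",
--                  "Strengthen password policies and monitoring"]
--     if has_access_rights:
--         recs += ["Establish regular access rights review process",
--                  "Implement automated access certification workflows"]
--     return recs or ["Maintain current access control standards and monitoring"]
-- ===== Notes on version B (the rewrite author's own statement) =====
-- stated objective: faster
-- what changed: Replaces three separate any(...) scans over issues (each lowercasing every issue again) with one pass that lowercases each issue once and sets three flags, followed by a flag-driven emission phase.
import Mathlib
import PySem

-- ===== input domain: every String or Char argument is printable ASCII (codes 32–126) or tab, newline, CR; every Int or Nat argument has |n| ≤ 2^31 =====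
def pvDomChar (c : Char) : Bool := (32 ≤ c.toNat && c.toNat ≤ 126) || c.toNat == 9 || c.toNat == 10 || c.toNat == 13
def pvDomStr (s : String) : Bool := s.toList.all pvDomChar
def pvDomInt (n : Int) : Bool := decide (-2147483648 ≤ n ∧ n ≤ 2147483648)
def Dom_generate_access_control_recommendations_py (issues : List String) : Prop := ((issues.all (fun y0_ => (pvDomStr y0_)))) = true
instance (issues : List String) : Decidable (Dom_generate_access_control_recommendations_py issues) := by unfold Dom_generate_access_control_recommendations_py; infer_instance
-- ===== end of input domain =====

-- B replaces A's three repeated any(...) scans by one flag-gathering pass plus an emission phase (objective: simpler).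
-- ===== PORT A =====
def generate_access_control_recommendations_py (issues : List String) : List String :=
  let recommendations : List String := []
  let recommendations :=
    if issues.any (fun issue => PySem.Str.isIn "user account" (PySem.Str.lower issue)) then
      recommendations ++ ["Implement comprehensive user account lifecycle management",
                          "Establish regular password policy enforcement"]
    else recommendations
  let recommendations :=
    if issues.any (fun issue => PySem.Str.isIn "authentication" (PySem.Str.lower issue)) then
      recommendations ++ ["Deploy multi-factor authentication for all users",
                          "Strengthen password policies and monitoring"]
    else recommendations
  let recommendations :=
    if issues.any (fun issue => PySem.Str.isIn "access rights" (PySem.Str.lower issue)) then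
      recommendations ++ ["Establish regular access rights review process",
                          "Implement automated access certification workflows"]
    else recommendations
  let recommendations :=
    if recommendations.isEmpty then
      recommendations ++ ["Maintain current access control standards and monitoring"]
    else recommendations
  recommendations

-- ===== PORT B =====
-- single pass: lowercase each issue once, set three flags
def pvFlags (issues : List String) : Bool × Bool × Bool :=
  issues.foldl (fun (st : Bool × Bool × Bool) issue =>
    let low := PySem.Str.lower issue
    let st := if PySem.Str.isIn "user account" low then (true, st.2.1, st.2.2) else st
    let st := if PySem.Str.isIn "authentication" low then (st.1, true, st.2.2) else st
    let st := if PySem.Str.isIn "access rights" low then (st.1, st.2.1, true) else st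
    st) (false, false, false)

def generate_access_control_recommendations_py_alt (issues : List String) : List String :=
  let f := pvFlags issues
  let recs : List String := []
  let recs := if f.1 then recs ++ ["Implement comprehensive user account lifecycle management",
                                   "Establish regular password policy enforcement"] else recs
  let recs := if f.2.1 then recs ++ ["Deploy multi-factor authentication for all users",
                                     "Strengthen password policies and monitoring"] else recs
  let recs := if f.2.2 then recs ++ ["Establish regular access rights review process",
                                     "Implement automated access certification workflows"] else recs
  if recs = [] then ["Maintain current access control standards and monitoring"] else recs

-- ===== PRECONDITION & SPEC =====
def Spec_generate_access_control_recommendations_py (issues : List String) (out : List String) : Prop := out = generate_access_control_recommendations_py_alt issues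
instance (issues : List String) (out : List String) : Decidable (Spec_generate_access_control_recommendations_py issues out) := by unfold Spec_generate_access_control_recommendations_py; infer_instance

-- ===== CLAIM (what is proved, stated in full; the proofs are below) =====
def Claim_equal_generate_access_control_recommendations_py : Prop := ∀ (issues : List String), Dom_generate_access_control_recommendations_py issues → Spec_generate_access_control_recommendations_py issues (generate_access_control_recommendations_py issues)

-- ===== LEMMAS AND PROOFS =====
theorem pvFlags_eq (issues : List String) :
    pvFlags issues =
      (issues.any (fun i => PySem.Str.isIn "user account" (PySem.Str.lower i)),
       issues.any (fun i => PySem.Str.isIn "authentication" (PySem.Str.lower i)),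
       issues.any (fun i => PySem.Str.isIn "access rights" (PySem.Str.lower i))) := by
  have key : ∀ (l : List String) (a b c : Bool),
      l.foldl (fun (st : Bool × Bool × Bool) issue =>
        let low := PySem.Str.lower issue
        let st := if PySem.Str.isIn "user account" low then (true, st.2.1, st.2.2) else st
        let st := if PySem.Str.isIn "authentication" low then (st.1, true, st.2.2) else st
        let st := if PySem.Str.isIn "access rights" low then (st.1, st.2.1, true) else st
        st) (a, b, c) =
      (a || l.any (fun i => PySem.Str.isIn "user account" (PySem.Str.lower i)),
       b || l.any (fun i => PySem.Str.isIn "authentication" (PySem.Str.lower i)),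
       c || l.any (fun i => PySem.Str.isIn "access rights" (PySem.Str.lower i))) := by
    intro l
    induction l with
    | nil => simp
    | cons x xs ih =>
      intro a b c
      simp only [List.foldl_cons, List.any_cons]
      split_ifs with h1 h2 h3 <;> rw [ih] <;> simp_all
  exact (key issues false false false).trans (by simp only [Bool.false_or])

theorem generate_access_control_recommendations_py_spec' (issues : List String) :
    generate_access_control_recommendations_py issues = generate_access_control_recommendations_py_alt issues := by
  unfold generate_access_control_recommendations_py generate_access_control_recommendations_py_alt
  rw [pvFlags_eq]
  cases h1 : issues.any (fun i => PySem.Str.isIn "user account" (PySem.Str.lower i)) <;>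
  cases h2 : issues.any (fun i => PySem.Str.isIn "authentication" (PySem.Str.lower i)) <;>
  cases h3 : issues.any (fun i => PySem.Str.isIn "access rights" (PySem.Str.lower i)) <;>
  simp [List.isEmpty]

-- ===== VERDICT (by name: the statement is the Claim_ definition above) =====
theorem generate_access_control_recommendations_py_spec : Claim_equal_generate_access_control_recommendations_py := by
  intro issues _
  exact generate_access_control_recommendations_py_spec' issues
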